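-- pv_equiv track=rewrite | github.com/samiullahsaleem/cyberblock | Python/Encrypted message.py | highest_count
-- ===== SOURCE A (Python) =====
-- def highest_count(sent):
--     max_num, index = 0, 0
--     for i in range(len(sent)):
--         Count = 0
--         for words in sent[i]:
--             Count += 1
--         if max_num < Count:
--             max_num = Count
--             index = i
--     return index
-- ===== SOURCE B (Python) =====
-- def highest_count(sent):
--     if not sent:
--         return 0
--     lengths = [len(e) for e in sent]
--     return lengths.index(max(lengths))
-- ===== Notes on version B (the rewrite author's own statement) =====
-- stated objective: simpler
-- what changed: Replaces A's index loop with a manual character-counting inner loop and running max/index tracking by a lengths table followed by max() and list.index(), guarding only the empty list.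
import Mathlib
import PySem

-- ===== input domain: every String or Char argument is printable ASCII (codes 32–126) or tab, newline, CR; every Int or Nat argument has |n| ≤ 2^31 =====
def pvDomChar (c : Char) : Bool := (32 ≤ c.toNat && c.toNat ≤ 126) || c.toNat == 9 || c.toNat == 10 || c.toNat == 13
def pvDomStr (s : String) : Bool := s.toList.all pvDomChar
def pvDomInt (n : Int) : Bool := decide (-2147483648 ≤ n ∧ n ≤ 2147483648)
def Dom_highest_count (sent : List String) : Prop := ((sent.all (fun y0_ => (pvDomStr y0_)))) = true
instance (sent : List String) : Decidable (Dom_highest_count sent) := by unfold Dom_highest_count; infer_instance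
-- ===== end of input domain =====

-- B replaces A's running-max/index loop with a lengths table plus max() and list.index() (objective: simpler).
-- ===== PORT A =====
def highest_count (sent : List String) : Int :=
  let st :=
    (PySem.List.pyRange 0 (PySem.List.len sent) 1).foldl
      (fun (st : Int × Int) i =>
        let Count := (PySem.List.pyGetD sent i "").toList.foldl (fun c _ => c + 1) (0 : Int)
        if st.1 < Count then (Count, i) else st)
      ((0 : Int), (0 : Int))
  st.2

-- ===== PORT B =====
def highest_count_alt (sent : List String) : Int :=
  if sent = [] then 0
  else
    let lengths := sent.map (fun e => PySem.Str.len e)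
    match PySem.List.max? lengths (fun x => x) with
    | none => 0                     -- unreachable: lengths nonempty
    | some m =>
      match PySem.List.index? lengths m with
      | some k => (k : Int)
      | none => 0                   -- unreachable: m ∈ lengths

-- ===== PRECONDITION & SPEC =====
def Spec_highest_count (sent : List String) (out : Int) : Prop := out = highest_count_alt sent
instance (sent : List String) (out : Int) : Decidable (Spec_highest_count sent out) := by unfold Spec_highest_count; infer_instance

-- ===== CLAIM (what is proved, stated in full; the proofs are below) =====
def Claim_equal_highest_count : Prop := ∀ (sent : List String), Dom_highest_count sent → Spec_highest_count sent (highest_count sent)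

-- ===== LEMMAS AND PROOFS =====

-- A's loop as structural recursion over the lengths, carrying (max_num, index) and the next index i
def fmi : List Int → Int → Int → Int → Int × Int
  | [], m, idx, _ => (m, idx)
  | c :: t, m, idx, i => if m < c then fmi t c i (i + 1) else fmi t m idx (i + 1)

theorem count_fold (l : List Char) (x : Int) :
    l.foldl (fun c _ => c + 1) x = x + l.length := by
  induction l generalizing x with
  | nil => simp
  | cons a t ih => rw [List.foldl_cons, ih]; push_cast [List.length_cons]; ring

theorem fmi_all_le (lens : List Int) (m idx i : Int) (h : ∀ c ∈ lens, c ≤ m) :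
    fmi lens m idx i = (m, idx) := by
  induction lens generalizing i with
  | nil => rfl
  | cons c t ih =>
    have hc : c ≤ m := h c (by simp)
    simp [fmi, not_lt.mpr hc]
    exact ih (i + 1) (fun x hx => h x (by simp [hx]))

theorem fmi_max (lens : List Int) (m idx i : Int) (h : m < lens.foldl max m) :
    (fmi lens m idx i).2 = i + (lens.idxOf (lens.foldl max m) : Int) := by
  induction lens generalizing m idx i with
  | nil => simp at h
  | cons c t ih =>
    by_cases hc : m < c
    · have hmc : max m c = c := max_eq_right hc.le
      by_cases ht : c < t.foldl max c
      · have hM : (c :: t).foldl max m = t.foldl max c := by simp [List.foldl, hmc]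
        have hne : (c == t.foldl max c) = false := beq_eq_false_iff_ne.mpr (ne_of_lt ht)
        rw [hM]
        simp [fmi, hc, List.idxOf_cons, hne, ih c i (i + 1) ht]
        ring
      · have hle := PySem.List.le_foldl_max t c
        have heq : t.foldl max c = c := le_antisymm (not_lt.mp ht) hle.1
        have hM : (c :: t).foldl max m = c := by simp [List.foldl, hmc, heq]
        have hall : ∀ x ∈ t, x ≤ c := fun x hx => heq ▸ hle.2 x hx
        rw [hM]
        simp [fmi, hc, fmi_all_le t c i (i + 1) hall]
    · have hmc : max m c = m := max_eq_left (not_lt.mp hc)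
      have hM : (c :: t).foldl max m = t.foldl max m := by simp [List.foldl, hmc]
      have h' : m < t.foldl max m := by rw [hM] at h; exact h
      have hne : (c == t.foldl max m) = false :=
        beq_eq_false_iff_ne.mpr (ne_of_lt (lt_of_le_of_lt (not_lt.mp hc) h'))
      rw [hM]
      simp [fmi, hc, List.idxOf_cons, hne, ih m idx (i + 1) h']
      ring

theorem strlen_eq (s : String) : PySem.Str.len s = (s.toList.length : Int) := by
  simp [PySem.Str.len]

theorem idxOf?_of_mem {l : List Int} {v : Int} (h : v ∈ l) :
    List.idxOf? v l = some (List.idxOf v l) := by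
  induction l with
  | nil => simp at h
  | cons a t ih =>
    by_cases hv : a = v
    · subst hv; simp [List.idxOf?_cons]
    · have hv' : (a == v) = false := beq_eq_false_iff_ne.mpr hv
      have hm : v ∈ t := by
        rcases List.mem_cons.mp h with rfl | hm
        · exact absurd rfl hv
        · exact hm
      simp [List.idxOf?_cons, List.idxOf_cons, hv', ih hm]

theorem enum_fmi (xs : List String) (i m idx : Int) :
    (PySem.List.enumerate xs i).foldl
      (fun (st : Int × Int) (p : Int × String) =>
        let Count := p.2.toList.foldl (fun c _ => c + 1) (0 : Int)
        if st.1 < Count then (Count, p.1) else st) (m, idx)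
    = fmi (xs.map (fun e => PySem.Str.len e)) m idx i := by
  induction xs generalizing i m idx with
  | nil => simp [PySem.List.enumerate_nil, fmi]
  | cons x t ih =>
    rw [PySem.List.enumerate_cons, List.foldl_cons]
    simp only [List.map_cons, fmi, strlen_eq, count_fold, zero_add] at ih ⊢
    split_ifs with h
    · exact ih (i + 1) _ i
    · exact ih (i + 1) m idx

theorem A_as_fmi (sent : List String) :
    highest_count sent = (fmi (sent.map (fun e => PySem.Str.len e)) 0 0 0).2 := by
  have h := (PySem.List.enumerate_eq_map_pyRange (xs := sent) (d := "")).symm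
  calc highest_count sent
      = (((PySem.List.pyRange 0 (PySem.List.len sent) 1).map
            (fun j => (j, PySem.List.pyGetD sent j ""))).foldl
          (fun (st : Int × Int) (p : Int × String) =>
            let Count := p.2.toList.foldl (fun c _ => c + 1) (0 : Int)
            if st.1 < Count then (Count, p.1) else st) ((0 : Int), (0 : Int))).2 := by
        rw [List.foldl_map]; rfl
    _ = ((PySem.List.enumerate sent 0).foldl
          (fun (st : Int × Int) (p : Int × String) =>
            let Count := p.2.toList.foldl (fun c _ => c + 1) (0 : Int)
            if st.1 < Count then (Count, p.1) else st) ((0 : Int), (0 : Int))).2 := by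
        rw [h]
    _ = _ := by rw [enum_fmi]

-- ===== VERDICT (by name: the statement is the Claim_ definition above) =====
theorem highest_count_spec : Claim_equal_highest_count := by
  unfold Claim_equal_highest_count
  intro sent _
  unfold Spec_highest_count highest_count_alt
  cases sent with
  | nil => decide
  | cons x t =>
    simp only [List.cons_ne_nil, if_false, List.map_cons, PySem.List.max?_id_cons]
    set L := t.map (fun e => PySem.Str.len e) with hL
    set m := L.foldl max (PySem.Str.len x) with hm
    have hmem : m ∈ PySem.Str.len x :: L := by
      rcases PySem.List.foldl_max_mem L (PySem.Str.len x) with h | h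
      · rw [hm, h]; simp
      · exact List.mem_cons_of_mem _ (hm ▸ h)
    rw [PySem.List.index?_eq_idxOf?, idxOf?_of_mem hmem, A_as_fmi,
      show (x :: t).map (fun e => PySem.Str.len e) = PySem.Str.len x :: L from by
        rw [hL, List.map_cons]]
    have hx : (0 : Int) ≤ PySem.Str.len x := by rw [strlen_eq]; positivity
    have hnn : ∀ c ∈ PySem.Str.len x :: L, (0 : Int) ≤ c := by
      intro c hc
      rcases List.mem_cons.mp hc with rfl | hc
      · exact hx
      · rcases List.mem_map.mp (hL ▸ hc) with ⟨e, _, rfl⟩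
        rw [strlen_eq]; positivity
    have hfold : (PySem.Str.len x :: L).foldl max 0 = m := by
      rw [List.foldl_cons, max_eq_right hx, hm]
    by_cases h0 : (0 : Int) < (PySem.Str.len x :: L).foldl max 0
    · rw [fmi_max _ _ _ _ h0, hfold, zero_add]
    · have hle := PySem.List.le_foldl_max (PySem.Str.len x :: L) 0
      have hz : (PySem.Str.len x :: L).foldl max 0 = 0 := le_antisymm (not_lt.mp h0) hle.1
      have hall : ∀ c ∈ PySem.Str.len x :: L, c ≤ 0 := fun c hc => hz ▸ hle.2 c hc
      have hmz : m = 0 := le_antisymm (hall m hmem) (hnn m hmem)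
      have hxz : PySem.Str.len x = 0 := le_antisymm (hall _ (by simp)) hx
      rw [fmi_all_le _ _ _ _ hall, hmz, hxz]
      simp
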